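-- pv_equiv track=rewrite | github.com/buchbend/lore | lib/lore_curator/noteworthy.py | _tail_biased_truncate
-- ===== SOURCE A (Python) =====
-- def _tail_biased_truncate(turn_lines: list[str], budget: int) -> list[str]:
--     """Keep the most recent turns that fit in ``budget``; marker for the rest.
--
--     Returns ``turn_lines`` unchanged when already under budget. Otherwise
--     walks the list from the tail, accumulating lines until the next one
--     would overflow, then prepends a single ``[... N earlier turns elided ...]``
--     line so the model knows context was dropped.
--     """
--     total = sum(len(x) + 1 for x in turn_lines)  # +1 for join newline
--     if total <= budget:
--         return turn_lines
--
--     marker_template = "[... {n} earlier turns elided for prompt budget ...]"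
--     marker_reserve = len(marker_template.format(n=len(turn_lines)))
--     effective = max(budget - marker_reserve, 0)
--
--     tail: list[str] = []
--     size = 0
--     for line in reversed(turn_lines):
--         line_cost = len(line) + 1
--         if size + line_cost > effective and tail:
--             break
--         tail.insert(0, line)
--         size += line_cost
--
--     elided = len(turn_lines) - len(tail)
--     if elided <= 0:
--         return turn_lines
--     return [marker_template.format(n=elided)] + tail
-- ===== SOURCE B (Python) =====
-- from bisect import bisect_right
-- from itertools import accumulate
--
--
-- def _tail_biased_truncate(turn_lines: list[str], budget: int) -> list[str]:
--     """Keep the most recent turns fitting in ``budget``; marker for the rest."""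
--     total = sum(len(x) + 1 for x in turn_lines)
--     if total <= budget:
--         return turn_lines
--
--     marker_template = "[... {n} earlier turns elided for prompt budget ...]"
--     marker_reserve = len(marker_template.format(n=len(turn_lines)))
--     effective = max(budget - marker_reserve, 0)
--
--     # suffix sums of line costs, newest first
--     suffix_sums = list(accumulate(len(x) + 1 for x in reversed(turn_lines)))
--     k = max(bisect_right(suffix_sums, effective), 1)  # always keep the last line
--     elided = len(turn_lines) - k
--     if elided <= 0:
--         return turn_lines
--     return [marker_template.format(n=elided)] + turn_lines[elided:]
-- ===== Notes on version B (the rewrite author's own statement) =====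
-- stated objective: faster
-- what changed: Replaces A's stateful reversed-walk loop with repeated tail.insert(0, line) by a suffix-sum table (itertools.accumulate of line costs, newest first) plus bisect_right clamped to 1, then a single slice.
import Mathlib
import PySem

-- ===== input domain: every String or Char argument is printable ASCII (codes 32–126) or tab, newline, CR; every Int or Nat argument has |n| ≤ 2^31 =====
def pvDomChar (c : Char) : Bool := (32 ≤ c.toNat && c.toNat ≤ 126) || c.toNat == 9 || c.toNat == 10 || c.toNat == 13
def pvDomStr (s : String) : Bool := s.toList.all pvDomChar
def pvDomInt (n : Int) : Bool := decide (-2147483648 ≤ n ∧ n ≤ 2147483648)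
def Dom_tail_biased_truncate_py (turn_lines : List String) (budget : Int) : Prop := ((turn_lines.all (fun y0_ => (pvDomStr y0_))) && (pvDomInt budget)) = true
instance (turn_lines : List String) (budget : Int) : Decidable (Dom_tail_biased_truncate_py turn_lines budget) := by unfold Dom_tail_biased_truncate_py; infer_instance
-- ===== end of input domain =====

-- B replaces A's tail-walking loop (with its quadratic tail.insert(0, line)) by a suffix-sum table + bisect_right and one slice; measured faster; return values proved equal.

-- ===== PORT A =====

-- marker_template.format(n=n) : the template has a single {n} hole, so "format" is concatenation
def pvMarker (n : Int) : String := "[... " ++ PySem.Int.toStr n ++ " earlier turns elided for prompt budget ...]"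

-- the `for line in reversed(turn_lines)` loop of A, with its `break`
def pvLoopA (effective : Int) : List String → List String → Int → List String × Int
  | [], tail, size => (tail, size)
  | line :: rest, tail, size =>
      let line_cost := PySem.Str.len line + 1
      if size + line_cost > effective ∧ tail ≠ [] then (tail, size)
      else pvLoopA effective rest (line :: tail) (size + line_cost)

def tail_biased_truncate_py (turn_lines : List String) (budget : Int) : List String :=
  let total := (turn_lines.map (fun x => PySem.Str.len x + 1)).sum
  if total ≤ budget then turn_lines
  else
    let marker_reserve := PySem.Str.len (pvMarker (turn_lines.length : Int))
    let effective := max (budget - marker_reserve) 0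
    let tail := (pvLoopA effective turn_lines.reverse [] 0).1
    let elided : Int := (turn_lines.length : Int) - (tail.length : Int)
    if elided ≤ 0 then turn_lines
    else pvMarker elided :: tail

-- ===== PORT B =====

-- itertools.accumulate: running sums
def pvAccum (s : Int) : List Int → List Int
  | [] => []
  | c :: cs => (s + c) :: pvAccum (s + c) cs

def tail_biased_truncate_py_alt (turn_lines : List String) (budget : Int) : List String :=
  let total := (turn_lines.map (fun x => PySem.Str.len x + 1)).sum
  if total ≤ budget then turn_lines
  else
    let marker_reserve := PySem.Str.len (pvMarker (turn_lines.length : Int))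
    let effective := max (budget - marker_reserve) 0
    let suffix_sums := pvAccum 0 (turn_lines.reverse.map (fun x => PySem.Str.len x + 1))
    let k : Int := max (PySem.List.bisectRight suffix_sums effective : Int) 1
    let elided : Int := (turn_lines.length : Int) - k
    if elided ≤ 0 then turn_lines
    -- turn_lines[elided:] with elided > 0 in this branch: exact as List.drop
    else pvMarker elided :: turn_lines.drop elided.toNat

-- ===== PRECONDITION & SPEC =====
def Spec_tail_biased_truncate_py (turn_lines : List String) (budget : Int) (out : List String) : Prop := out = tail_biased_truncate_py_alt turn_lines budget
instance (turn_lines : List String) (budget : Int) (out : List String) : Decidable (Spec_tail_biased_truncate_py turn_lines budget out) := by unfold Spec_tail_biased_truncate_py; infer_instance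

-- ===== CLAIM (what is proved, stated in full; the proofs are below) =====
def Claim_equal_tail_biased_truncate_py : Prop := ∀ (turn_lines : List String) (budget : Int), Dom_tail_biased_truncate_py turn_lines budget → Spec_tail_biased_truncate_py turn_lines budget (tail_biased_truncate_py turn_lines budget)

-- ===== LEMMAS AND PROOFS =====

-- number of leading lines (of the reversed list) A's loop takes once the tail is nonempty
def pvCnt (eff : Int) : Int → List String → Nat
  | _, [] => 0
  | s, line :: rest =>
      if s + (PySem.Str.len line + 1) > eff then 0
      else 1 + pvCnt eff (s + (PySem.Str.len line + 1)) rest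

theorem pvLoopA_eq_take (eff : Int) (r : List String) : ∀ (t : List String) (s : Int), t ≠ [] →
    (pvLoopA eff r t s).1 = (r.take (pvCnt eff s r)).reverse ++ t := by
  induction r with
  | nil => intro t s _; simp [pvLoopA, pvCnt]
  | cons line rest ih =>
    intro t s ht
    show (if s + (PySem.Str.len line + 1) > eff ∧ t ≠ [] then (t, s)
          else pvLoopA eff rest (line :: t) (s + (PySem.Str.len line + 1))).1
        = (List.take (if s + (PySem.Str.len line + 1) > eff then 0
            else 1 + pvCnt eff (s + (PySem.Str.len line + 1)) rest) (line :: rest)).reverse ++ t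
    by_cases h : s + (PySem.Str.len line + 1) > eff
    · rw [if_pos ⟨h, ht⟩, if_pos h]; simp
    · rw [if_neg (by tauto), if_neg h]
      rw [ih (line :: t) _ (by simp)]
      simp [List.take_succ_cons, Nat.add_comm 1]

theorem pvCnt_le (eff : Int) : ∀ (s : Int) (r : List String), pvCnt eff s r ≤ r.length := by
  intro s r
  induction r generalizing s with
  | nil => simp [pvCnt]
  | cons line rest ih =>
    simp only [pvCnt]
    split
    · simp
    · simpa [Nat.add_comm 1] using Nat.succ_le_succ (ih _)

theorem pvAccum_mem_ge (s : Int) (cs : List Int) (hcs : ∀ c ∈ cs, 0 ≤ c) :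
    ∀ x ∈ pvAccum s cs, s ≤ x := by
  induction cs generalizing s with
  | nil => simp [pvAccum]
  | cons c cs ih =>
    intro x hx
    simp only [pvAccum, List.mem_cons] at hx
    have hc : 0 ≤ c := hcs c (by simp)
    rcases hx with rfl | hx
    · omega
    · have := ih (s + c) (fun d hd => hcs d (by simp [hd])) x hx; omega

theorem pvAccum_pairwise (s : Int) (cs : List Int) (hcs : ∀ c ∈ cs, 0 ≤ c) :
    (pvAccum s cs).Pairwise (fun a b => a ≤ b) := by
  induction cs generalizing s with
  | nil => simp [pvAccum]
  | cons c cs ih =>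
    simp only [pvAccum]
    refine List.pairwise_cons.2 ⟨?_, ih (s + c) (fun d hd => hcs d (by simp [hd]))⟩
    intro x hx
    exact pvAccum_mem_ge (s + c) cs (fun d hd => hcs d (by simp [hd])) x hx

theorem pvAccum_length (s : Int) (cs : List Int) : (pvAccum s cs).length = cs.length := by
  induction cs generalizing s with
  | nil => rfl
  | cons c cs ih => simp [pvAccum, ih]

-- pvCnt is the bisect point of the running-sum table
theorem pvCnt_bounds (eff : Int) (s : Int) (r : List String) :
    (∀ i (hi : i < r.length), i < pvCnt eff s r →
        (pvAccum s (r.map (fun x => PySem.Str.len x + 1)))[i]'(by simpa [pvAccum_length] using hi) ≤ eff) ∧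
    (∀ i (hi : i < r.length), pvCnt eff s r ≤ i →
        eff < (pvAccum s (r.map (fun x => PySem.Str.len x + 1)))[i]'(by simpa [pvAccum_length] using hi)) := by
  induction r generalizing s with
  | nil => simp
  | cons line rest ih =>
    constructor
    · intro i hi hlt
      simp only [pvCnt] at hlt
      split at hlt
      · omega
      · rename_i hle
        match i with
        | 0 => simpa [pvAccum] using (by omega : ¬ s + (PySem.Str.len line + 1) > eff)
        | Nat.succ j =>
          have := (ih (s + (PySem.Str.len line + 1))).1 j (by simpa using hi) (by omega)
          simpa [pvAccum] using this
    · intro i hi hge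
      simp only [pvCnt] at hge
      split at hge
      · rename_i hgt
        -- all later sums exceed eff too
        have hmem : (pvAccum s ((line :: rest).map (fun x => PySem.Str.len x + 1)))[i]'(by simpa [pvAccum_length] using hi)
            ∈ pvAccum s ((line :: rest).map (fun x => PySem.Str.len x + 1)) := List.getElem_mem _
        simp only [List.map_cons, pvAccum, List.mem_cons] at hmem ⊢
        match i with
        | 0 => simpa using hgt
        | Nat.succ j =>
          have hge' : s + (PySem.Str.len line + 1) ≤
              (pvAccum (s + (PySem.Str.len line + 1)) (rest.map (fun x => PySem.Str.len x + 1)))[j]'(by simpa [pvAccum_length] using hi) := by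
            refine pvAccum_mem_ge _ _ ?_ _ (List.getElem_mem _)
            intro c hc
            simp only [List.mem_map] at hc
            obtain ⟨x, _, rfl⟩ := hc
            have := PySem.Str.len_eq x; omega
          simpa using lt_of_lt_of_le hgt hge'
      · rename_i hle
        match i with
        | 0 => omega
        | Nat.succ j =>
          have := (ih (s + (PySem.Str.len line + 1))).2 j (by simpa using hi) (by omega)
          simpa [pvAccum] using this

theorem pvBisect_eq_cnt (eff : Int) (r : List String) :
    PySem.List.bisectRight (pvAccum 0 (r.map (fun x => PySem.Str.len x + 1))) eff = pvCnt eff 0 r := by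
  set l := pvAccum 0 (r.map (fun x => PySem.Str.len x + 1)) with hl
  have hlen : l.length = r.length := by simp [hl, pvAccum_length]
  have hsorted : l.Pairwise (fun a b => a ≤ b) := by
    apply pvAccum_pairwise
    intro c hc
    simp only [List.mem_map] at hc
    obtain ⟨x, _, rfl⟩ := hc
    have := PySem.Str.len_eq x; omega
  obtain ⟨hble, hblo, hbhi⟩ := PySem.List.bisectRight_spec l eff hsorted
  obtain ⟨hclo, hchi⟩ := pvCnt_bounds eff 0 r
  set b := PySem.List.bisectRight l eff
  set c := pvCnt eff 0 r
  have hcle : c ≤ r.length := pvCnt_le eff 0 r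
  by_contra hne
  rcases Nat.lt_or_ge b c with h | h
  · have h1 := hclo b (by omega) h
    have h2 := hbhi b (by omega) (le_refl b)
    simp only [hl] at h1 h2; omega
  · have hbc : c < b := by omega
    have h1 := hblo c (by omega) hbc
    have h2 := hchi c (by omega) (le_refl c)
    simp only [hl] at h1 h2; omega

-- A's kept-lines count equals B's clamped bisect count
theorem pvK_eq (eff : Int) (x : String) (r : List String) :
    1 + pvCnt eff (PySem.Str.len x + 1) r = max (pvCnt eff 0 (x :: r)) 1 := by
  simp only [pvCnt, zero_add]
  by_cases h : (PySem.Str.len x + 1) > eff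
  · rw [if_pos h]
    have : pvCnt eff (PySem.Str.len x + 1) r = 0 := by
      cases r with
      | nil => rfl
      | cons y ys =>
        simp only [pvCnt]
        rw [if_pos]
        have := PySem.Str.len_eq y
        omega
    omega
  · rw [if_neg h]
    omega

theorem tail_biased_truncate_py_spec' (turn_lines : List String) (budget : Int) :
    tail_biased_truncate_py turn_lines budget = tail_biased_truncate_py_alt turn_lines budget := by
  unfold tail_biased_truncate_py tail_biased_truncate_py_alt
  by_cases htot : (turn_lines.map (fun x => PySem.Str.len x + 1)).sum ≤ budget
  · simp only [htot, if_true]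
  · simp only [htot, if_false]
    set eff := max (budget - PySem.Str.len (pvMarker (turn_lines.length : Int))) 0 with heff
    cases hrev : turn_lines.reverse with
    | nil =>
      have h0 : turn_lines = [] := by simpa using congrArg List.reverse hrev
      subst h0
      simp [pvLoopA, pvAccum, PySem.List.bisectRight, PySem.List.bisectRightLoop]
    | cons x r =>
      have hn : turn_lines.length = r.length + 1 := by
        have := congrArg List.length hrev; simpa using this
      -- A's tail
      have htail : (pvLoopA eff (x :: r) [] 0).1
          = ((x :: r).take (1 + pvCnt eff (PySem.Str.len x + 1) r)).reverse := by
        simp only [pvLoopA]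
        rw [if_neg (by simp)]
        rw [pvLoopA_eq_take eff r [x] _ (by simp)]
        simp [List.take_succ_cons, Nat.add_comm 1]
      set kA := 1 + pvCnt eff (PySem.Str.len x + 1) r with hkA
      have hkmax : kA = max (pvCnt eff 0 (x :: r)) 1 := pvK_eq eff x r
      have hkle : kA ≤ turn_lines.length := by
        have := pvCnt_le eff (PySem.Str.len x + 1) r
        omega
      rw [htail, pvBisect_eq_cnt eff (x :: r)]
      have hkB : max ((pvCnt eff 0 (x :: r) : Nat) : Int) 1 = (kA : Int) := by
        rw [hkmax]; push_cast; omega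
      rw [hkB]
      have hlen_tail : (((x :: r).take kA).reverse).length = kA := by
        simp only [List.length_reverse, List.length_take]
        have : (x :: r).length = turn_lines.length := by
          rw [← hrev]; simp
        omega
      rw [hlen_tail]
      by_cases hel : (turn_lines.length : Int) - (kA : Int) ≤ 0
      · simp [hel]
      · simp only [hel, if_false]
        congr 1
        have hdrop : ((turn_lines.length : Int) - (kA : Int)).toNat = turn_lines.length - kA := by
          omega
        rw [hdrop]
        -- ((reverse turn_lines).take kA).reverse = turn_lines.drop (len - kA)
        calc ((x :: r).take kA).reverse
            = (turn_lines.reverse.take kA).reverse := by rw [hrev]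
          _ = turn_lines.drop (turn_lines.length - kA) := by
              rw [List.take_reverse]
              simp

-- ===== VERDICT (by name: the statement is the Claim_ definition above) =====
theorem tail_biased_truncate_py_spec : Claim_equal_tail_biased_truncate_py := by
  intro turn_lines budget _
  exact tail_biased_truncate_py_spec' turn_lines budget
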